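-- pv_equiv track=rewrite | github.com/rafaelGuasselli/exercicios | vjudge/lista_2_adhock/e-anagram.py | combinacoes
-- ===== SOURCE A (Python) =====
-- def combinacoes(grupo):
-- 	length = len(grupo)
-- 	combinacoes = []
--
-- 	grupo.sort()
-- 	for i in range(0, length):
-- 		for j in range(i+1, length):
-- 			combinacoes.append("{:s} = {:s}".format(grupo[i], grupo[j]))
--
-- 	combinacoes.sort()
-- 	return combinacoes
-- ===== SOURCE B (Python) =====
-- def combinacoes(grupo):
-- 	cont = {}
-- 	for w in grupo:
-- 		cont[w] = cont.get(w, 0) + 1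
-- 	vals = sorted(cont)
-- 	pares = []
-- 	for i, v in enumerate(vals):
-- 		c = cont[v]
-- 		pares += ["{:s} = {:s}".format(v, v)] * (c * (c - 1) // 2)
-- 		for w in vals[i + 1:]:
-- 			pares += ["{:s} = {:s}".format(v, w)] * (c * cont[w])
-- 	pares.sort()
-- 	return pares
-- ===== Notes on version B (the rewrite author's own statement) =====
-- stated objective: alternative
-- what changed: B replaces A's sort-then-enumerate-all-index-pairs scheme by a counting dictionary: it groups equal words with their multiplicities, iterates over the sorted DISTINCT values only, formats each distinct pair string once and replicates it by the product of counts (C(c,2) within a group), then sorts; it also does not mutate grupo.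
import Mathlib
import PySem

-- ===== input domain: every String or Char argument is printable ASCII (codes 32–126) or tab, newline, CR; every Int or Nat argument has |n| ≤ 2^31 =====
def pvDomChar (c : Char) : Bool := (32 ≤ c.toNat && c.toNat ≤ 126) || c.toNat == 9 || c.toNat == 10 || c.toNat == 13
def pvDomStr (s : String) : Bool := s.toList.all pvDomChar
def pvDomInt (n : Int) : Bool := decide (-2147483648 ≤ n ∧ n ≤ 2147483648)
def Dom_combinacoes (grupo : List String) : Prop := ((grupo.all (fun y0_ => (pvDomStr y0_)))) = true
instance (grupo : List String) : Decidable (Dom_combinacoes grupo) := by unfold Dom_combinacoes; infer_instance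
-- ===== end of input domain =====

-- B replaces A's enumerate-all-index-pairs scheme by a counting dict over the distinct words,
-- emitting each distinct pair string once, replicated by the product of counts (alternative
-- grouping algorithm; NOTE: A sorts `grupo` in place and B does not — the equivalence proved
-- here is about the return value only).

-- "{:s} = {:s}".format(x, y)  (shared format-string literal of both programs)
def pvFmt (x y : String) : String := PySem.Str.join " = " [x, y]

-- ===== PORT A =====
def combinacoes (grupo : List String) : List String :=
  let length := PySem.List.len grupo
  let g := PySem.List.sorted grupo (fun x => x) false
  let combs : List String :=
    (PySem.List.pyRange 0 length).foldl
      (fun acc i =>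
        (PySem.List.pyRange (i + 1) length).foldl
          (fun acc2 j => acc2 ++ [pvFmt (PySem.List.pyGetD g i "") (PySem.List.pyGetD g j "")])
          acc)
      []
  PySem.List.sorted combs (fun x => x) false

-- ===== PORT B =====
def combinacoes_alt (grupo : List String) : List String :=
  let cont : PySem.Dict String Int :=
    grupo.foldl (fun d w => d.insert w (d.getD w 0 + 1)) PySem.Dict.empty
  let vals := PySem.List.sorted (PySem.Dict.keys cont) (fun x => x) false
  let pares : List String :=
    (PySem.List.enumerate vals).foldl
      (fun acc p =>
        let c := cont.getD p.2 0
        let acc2 := acc ++ PySem.List.pyRepeat [pvFmt p.2 p.2] (PySem.Int.floordiv (c * (c - 1)) 2)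
        (PySem.List.slice vals (some (p.1 + 1)) none).foldl
          (fun a w => a ++ PySem.List.pyRepeat [pvFmt p.2 w] (c * cont.getD w 0)) acc2)
      []
  PySem.List.sorted pares (fun x => x) false

-- ===== PRECONDITION & SPEC =====
def Spec_combinacoes (grupo : List String) (out : List String) : Prop := out = combinacoes_alt grupo
instance (grupo : List String) (out : List String) : Decidable (Spec_combinacoes grupo out) := by unfold Spec_combinacoes; infer_instance

-- ===== CLAIM (what is proved, stated in full; the proofs are below) =====
def Claim_equal_combinacoes : Prop := ∀ (grupo : List String), Dom_combinacoes grupo → Spec_combinacoes grupo (combinacoes grupo)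

-- ===== LEMMAS AND PROOFS =====

-- all pairs "earlier element, later element" of a list, combined by f
def opairs (f : String → String → String) : List String → List String
  | [] => []
  | x :: xs => xs.map (f x) ++ opairs f xs

-- triangle number: number of unordered pairs inside a group of m equal words
def tri (m : Nat) : Nat := m * (m - 1) / 2

-- B's grouped emission: for each distinct value v (in order) the within-group pairs, then
-- the cross pairs with every later distinct value, weighted by the counts
def emit (cnt : String → Nat) : List String → List String
  | [] => []
  | v :: vs =>
      List.replicate (tri (cnt v)) (pvFmt v v)
        ++ vs.flatMap (fun w => List.replicate (cnt v * cnt w) (pvFmt v w))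
        ++ emit cnt vs

----------------------------------------------------------------- A side

lemma pyRange_shift (a b : Int) :
    PySem.List.pyRange (a + 1) (b + 1) = (PySem.List.pyRange a b).map (· + 1) := by
  by_cases h : a < b
  · rw [PySem.List.pyRange_one_cons h, PySem.List.pyRange_one_cons (by omega : a + 1 < b + 1),
      List.map_cons, ← pyRange_shift (a + 1) b]
  · rw [PySem.List.pyRange_one_eq_nil (by omega), PySem.List.pyRange_one_eq_nil (by omega), List.map_nil]
termination_by (b - a).toNat
decreasing_by omega

lemma getD_cons_shift (x : String) (xs : List String) (j : Int) (hj : 0 ≤ j) :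
    PySem.List.pyGetD (x :: xs) (j + 1) "" = PySem.List.pyGetD xs j "" := by
  obtain ⟨n, rfl⟩ := Int.eq_ofNat_of_zero_le hj
  have h1 : ((n : Int) + 1) = ((n + 1 : Nat) : Int) := by push_cast; ring
  rw [h1, PySem.List.pyGetD_natCast, PySem.List.pyGetD_natCast]
  simp [List.getD]

-- A's two index loops build exactly the ordered-pair list of g
lemma flatA (g : List String) :
    (PySem.List.pyRange 0 (PySem.List.len g)).flatMap
      (fun i => (PySem.List.pyRange (i + 1) (PySem.List.len g)).map
        (fun j => pvFmt (PySem.List.pyGetD g i "") (PySem.List.pyGetD g j ""))) =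
    opairs pvFmt g := by
  induction g with
  | nil => simp [opairs, PySem.List.len_eq]
  | cons x xs ih =>
    have hlen : PySem.List.len (x :: xs) = (xs.length : Int) + 1 := by
      rw [PySem.List.len_eq, List.length_cons]; push_cast; ring
    have hlenxs : PySem.List.len xs = (xs.length : Int) := by simp [PySem.List.len_eq]
    rw [hlen, PySem.List.pyRange_one_cons (by omega : (0:Int) < (xs.length : Int) + 1),
      List.flatMap_cons]
    have hshift0 : PySem.List.pyRange (0 + 1) ((xs.length : Int) + 1)
        = (PySem.List.pyRange 0 (xs.length : Int)).map (· + 1) := pyRange_shift 0 _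
    have hblock : (PySem.List.pyRange (0 + 1) ((xs.length : Int) + 1)).map
        (fun j => pvFmt (PySem.List.pyGetD (x :: xs) 0 "") (PySem.List.pyGetD (x :: xs) j ""))
        = xs.map (pvFmt x) := by
      rw [hshift0, List.map_map]
      rw [List.map_congr_left (g := fun j => pvFmt x (PySem.List.pyGetD xs j ""))
        (fun j hj => by
          have hj0 : 0 ≤ j := (PySem.List.mem_pyRange_one.mp hj).1
          simp only [Function.comp]
          rw [getD_cons_shift x xs j hj0, PySem.List.pyGetD_zero_cons])]
      rw [show (fun j => pvFmt x (PySem.List.pyGetD xs j "")) =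
          (fun s => pvFmt x s) ∘ (fun j => PySem.List.pyGetD xs j "") from rfl]
      rw [← List.map_map, ← hlenxs, PySem.List.map_pyGetD_pyRange_zero]
    rw [hblock]
    have hrest : (PySem.List.pyRange (0 + 1) ((xs.length : Int) + 1)).flatMap
        (fun i => (PySem.List.pyRange (i + 1) ((xs.length : Int) + 1)).map
          (fun j => pvFmt (PySem.List.pyGetD (x :: xs) i "") (PySem.List.pyGetD (x :: xs) j "")))
        = opairs pvFmt xs := by
      rw [hshift0, List.flatMap_map, ← hlenxs]
      rw [← ih]
      apply List.flatMap_congr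
      intro i hi
      have hi0 : 0 ≤ i := (PySem.List.mem_pyRange_one.mp hi).1
      rw [show i + 1 + 1 = (i + 1) + 1 from rfl, pyRange_shift (i+1) (PySem.List.len xs),
        List.map_map, getD_cons_shift x xs i hi0]
      exact List.map_congr_left (fun j hj => by
        have hj0 : 0 ≤ j := by have := (PySem.List.mem_pyRange_one.mp hj).1; omega
        simp only [Function.comp]
        rw [getD_cons_shift x xs j hj0])
    rw [hrest]
    rfl

lemma combA (grupo : List String) :
    combinacoes grupo =
      PySem.List.sorted (opairs pvFmt (PySem.List.sorted grupo (fun x => x) false)) (fun x => x) false := by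
  unfold combinacoes
  simp only [PySem.List.foldl_append_singleton_eq_map, PySem.List.foldl_append_eq_flatMap,
    List.nil_append]
  have hlen : PySem.List.len grupo
      = PySem.List.len (PySem.List.sorted grupo (fun x => x) false) := by
    simp [PySem.List.len_eq, PySem.List.length_sorted]
  rw [hlen, flatA]

----------------------------------------------------------------- B side

lemma tri_succ (c : Nat) : tri (c + 1) = c + tri c := by
  unfold tri
  cases c with
  | zero => rfl
  | succ k =>
    simp only [Nat.add_sub_cancel]
    rw [show (k + 1 + 1) * (k + 1) = (k + 1) * k + (k + 1) * 2 from by ring,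
      Nat.add_mul_div_right _ _ (by norm_num : 0 < 2)]
    omega

-- the two pyRepeat blocks of the port, with the Int count arithmetic turned into Nat
lemma pyRepeat_tri (m : Nat) (a : String) :
    PySem.List.pyRepeat [a] (PySem.Int.floordiv ((m : Int) * ((m : Int) - 1)) 2)
      = List.replicate (tri m) a := by
  have h : (m : Int) * ((m : Int) - 1) = ((m * (m - 1) : Nat) : Int) := by
    cases m with
    | zero => simp
    | succ k => push_cast [Nat.succ_sub_one]; ring
  rw [h, show (2 : Int) = ((2 : Nat) : Int) from by norm_num, PySem.Int.floordiv_natCast,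
    PySem.List.pyRepeat_singleton]
  simp only [Int.toNat_natCast]
  simp [tri]

lemma pyRepeat_mul (m k : Nat) (a : String) :
    PySem.List.pyRepeat [a] ((m : Int) * (k : Int)) = List.replicate (m * k) a := by
  rw [show (m : Int) * (k : Int) = ((m * k : Nat) : Int) by push_cast; ring,
    PySem.List.pyRepeat_singleton]
  simp only [Int.toNat_natCast]

-- B's enumerate loop over the sorted distinct values builds the grouped emission
lemma emitB_aux (vals : List String) (cnt : String → Nat) (s : Nat) :
    (PySem.List.enumerate (vals.drop s) (s : Int)).flatMap
      (fun p =>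
        PySem.List.pyRepeat [pvFmt p.2 p.2]
          (PySem.Int.floordiv (((cnt p.2 : Int)) * ((cnt p.2 : Int) - 1)) 2)
        ++ (PySem.List.slice vals (some (p.1 + 1)) none).flatMap
            (fun w => PySem.List.pyRepeat [pvFmt p.2 w] ((cnt p.2 : Int) * (cnt w : Int))))
      = emit cnt (vals.drop s) := by
  rcases hd : vals.drop s with _ | ⟨v, rest⟩
  · rfl
  · have hs : s < vals.length := by
      by_contra h
      rw [List.drop_eq_nil_of_le (by omega)] at hd
      simp at hd
    have hrest : vals.drop (s + 1) = rest := by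
      have h1 : vals.drop (s + 1) = (vals.drop s).drop 1 := by rw [List.drop_drop]
      rw [h1, hd, List.drop_one, List.tail_cons]
    have henum : PySem.List.enumerate (v :: rest) (s : Int)
        = ((s : Int), v) :: PySem.List.enumerate rest ((s : Int) + 1) := rfl
    rw [henum, List.flatMap_cons]
    have hcast : ((s : Int) + 1) = ((s + 1 : Nat) : Int) := by push_cast; ring
    have hslice : PySem.List.slice vals (some ((s : Int) + 1)) none = rest := by
      rw [hcast, PySem.List.slice_from_natCast, hrest]
    rw [hslice, hcast, ← hrest, emitB_aux vals cnt (s + 1), hrest]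
    show _ ++ _ = _
    rw [pyRepeat_tri]
    rw [List.flatMap_congr (fun w _ => pyRepeat_mul (cnt v) (cnt w) (pvFmt v w))]
    simp [emit]
termination_by vals.length - s
decreasing_by omega

-- B's port, characterised: sort the grouped emission over the sorted distinct values
lemma combB (grupo : List String) :
    combinacoes_alt grupo =
      PySem.List.sorted
        (emit (fun v => grupo.count v)
          (PySem.List.sorted (PySem.List.dedup grupo) (fun x => x) false))
        (fun x => x) false := by
  unfold combinacoes_alt
  rw [PySem.Dict.foldl_insert_getD_add_one_eq_counter]
  simp only [PySem.Dict.getD_counter, PySem.Dict.keys_counter, ← PySem.List.dedup_eq_ofList]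
  have hfold :
      ∀ (L : List (Int × String)) (init : List String),
        L.foldl
          (fun acc p =>
            (PySem.List.slice
                (PySem.List.sorted (PySem.List.dedup grupo) (fun x => x) false)
                (some (p.1 + 1)) none).foldl
              (fun a w => a ++ PySem.List.pyRepeat [pvFmt p.2 w]
                ((grupo.count p.2 : Int) * (grupo.count w : Int)))
              (acc ++ PySem.List.pyRepeat [pvFmt p.2 p.2]
                (PySem.Int.floordiv ((grupo.count p.2 : Int) * ((grupo.count p.2 : Int) - 1)) 2)))
          init
        = init ++ L.flatMap
            (fun p =>
              PySem.List.pyRepeat [pvFmt p.2 p.2]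
                (PySem.Int.floordiv ((grupo.count p.2 : Int) * ((grupo.count p.2 : Int) - 1)) 2)
              ++ (PySem.List.slice
                    (PySem.List.sorted (PySem.List.dedup grupo) (fun x => x) false)
                    (some (p.1 + 1)) none).flatMap
                  (fun w => PySem.List.pyRepeat [pvFmt p.2 w]
                    ((grupo.count p.2 : Int) * (grupo.count w : Int)))) := by
    intro L
    induction L with
    | nil => intro init; simp
    | cons p L ih =>
      intro init
      rw [List.foldl_cons, PySem.List.foldl_append_eq_flatMap, ih, List.flatMap_cons]
      simp [List.append_assoc]
  rw [hfold]
  have := emitB_aux (PySem.List.sorted (PySem.List.dedup grupo) (fun x => x) false)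
    (fun v => grupo.count v) 0
  simp only [List.drop_zero, Nat.cast_zero] at this
  rw [this, List.nil_append]

----------------------------------------------------------------- the combinatorics

-- a permutation goal whose two sides are the same blocks shuffled: compare counts
lemma perm_of_count_eq {l1 l2 : List String}
    (h : ∀ a, l1.count a = l2.count a) : l1.Perm l2 :=
  List.perm_iff_count.mpr h

lemma flatMap_append_perm (l : List String) (p q : String → List String) :
    (l.flatMap (fun x => p x ++ q x)).Perm (l.flatMap p ++ l.flatMap q) := by
  induction l with
  | nil => simp
  | cons x l ih =>
    simp only [List.flatMap_cons]
    refine (ih.append_left (p x ++ q x)).trans (perm_of_count_eq (fun a => ?_))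
    simp [List.count_append]
    omega

lemma flatten_replicate_perm (c : Nat) (vs : List String)
    (m : String → Nat) (a : String → String) :
    ((List.replicate c (vs.flatMap (fun w => List.replicate (m w) (a w)))).flatten).Perm
      (vs.flatMap (fun w => List.replicate (c * m w) (a w))) := by
  induction c with
  | zero => simp
  | succ k ih =>
    rw [List.replicate_succ, List.flatten_cons]
    have h1 : (vs.flatMap (fun w => List.replicate ((k + 1) * m w) (a w)))
        = vs.flatMap (fun w => List.replicate (m w) (a w) ++ List.replicate (k * m w) (a w)) := by
      apply List.flatMap_congr
      intro w _
      rw [← List.replicate_add]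
      congr 1
      ring
    rw [h1]
    exact (ih.append_left _).trans
      (flatMap_append_perm vs (fun w => List.replicate (m w) (a w))
        (fun w => List.replicate (k * m w) (a w))).symm

lemma opairs_replicate (f : String → String → String) (c : Nat) (v : String) :
    opairs f (List.replicate c v) = List.replicate (tri c) (f v v) := by
  induction c with
  | zero => rfl
  | succ k ih =>
    rw [List.replicate_succ]
    show (List.replicate k v).map (f v) ++ opairs f (List.replicate k v)
        = List.replicate (tri (k + 1)) (f v v)
    rw [ih, List.map_replicate, ← List.replicate_add, tri_succ]

lemma opairs_append_perm (f : String → String → String) (xs ys : List String) :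
    (opairs f (xs ++ ys)).Perm
      (opairs f xs ++ xs.flatMap (fun x => ys.map (f x)) ++ opairs f ys) := by
  induction xs with
  | nil => simp [opairs]
  | cons x xs ih =>
    show ((xs ++ ys).map (f x) ++ opairs f (xs ++ ys)).Perm _
    rw [List.map_append]
    refine (ih.append_left (xs.map (f x) ++ ys.map (f x))).trans
      (perm_of_count_eq (fun a => ?_))
    simp [opairs, List.count_append]
    omega

-- all ordered pairs of the count-replicated flatten ARE the grouped emission, up to order
lemma opairs_flat_perm (cnt : String → Nat) (vals : List String) :
    (opairs pvFmt (vals.flatMap (fun v => List.replicate (cnt v) v))).Perm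
      (emit cnt vals) := by
  induction vals with
  | nil => exact List.Perm.refl _
  | cons v vs ih =>
    rw [List.flatMap_cons]
    refine (opairs_append_perm pvFmt _ _).trans ?_
    rw [opairs_replicate]
    have hcross : ((List.replicate (cnt v) v).flatMap
          (fun x => (vs.flatMap (fun w => List.replicate (cnt w) w)).map (pvFmt x))).Perm
        (vs.flatMap (fun w => List.replicate (cnt v * cnt w) (pvFmt v w))) := by
      have h1 : (List.replicate (cnt v) v).flatMap
            (fun x => (vs.flatMap (fun w => List.replicate (cnt w) w)).map (pvFmt x))
          = (List.replicate (cnt v)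
              ((vs.flatMap (fun w => List.replicate (cnt w) w)).map (pvFmt v))).flatten := by
        rw [List.flatMap_def, List.map_replicate]
      have h2 : (vs.flatMap (fun w => List.replicate (cnt w) w)).map (pvFmt v)
          = vs.flatMap (fun w => List.replicate (cnt w) (pvFmt v w)) := by
        rw [List.map_flatMap]
        exact List.flatMap_congr (fun w _ => List.map_replicate ..)
      rw [h1, h2]
      exact flatten_replicate_perm (cnt v) vs cnt (fun w => pvFmt v w)
    show List.Perm _ (emit cnt (v :: vs))
    simp only [emit]
    rw [List.append_assoc, List.append_assoc]
    exact (hcross.append ih).append_left _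

-- count of the flatten of count-replicated groups, for distinct group values
lemma count_flat (c : String → Nat) (vals : List String) (h : vals.Nodup) (w : String) :
    (vals.flatMap (fun v => List.replicate (c v) v)).count w
      = if w ∈ vals then c w else 0 := by
  induction vals with
  | nil => simp
  | cons v vs ih =>
    rcases List.nodup_cons.mp h with ⟨hv, hnd⟩
    rw [List.flatMap_cons, List.count_append, List.count_replicate, ih hnd]
    by_cases hwv : w = v
    · subst hwv
      simp [hv]
    · rw [if_neg (by simpa using (fun h : v = w => hwv h.symm)), Nat.zero_add]
      by_cases hm : w ∈ vs <;> simp [hm, hwv]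

-- the flatten of count-replicated groups is sorted when the group values are
lemma pairwise_flat (c : String → Nat) (vals : List String)
    (h : vals.Pairwise (· ≤ ·)) :
    (vals.flatMap (fun v => List.replicate (c v) v)).Pairwise (· ≤ ·) := by
  induction vals with
  | nil => simp
  | cons v vs ih =>
    rw [List.flatMap_cons, List.pairwise_append]
    rcases List.pairwise_cons.mp h with ⟨hle, hvp⟩
    refine ⟨List.pairwise_replicate.mpr (Or.inr le_rfl), ih hvp, ?_⟩
    intro a ha b hb
    rw [List.eq_of_mem_replicate ha]
    obtain ⟨u, hu, hbrep⟩ := List.mem_flatMap.mp hb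
    rw [List.eq_of_mem_replicate hbrep]
    exact hle u hu

-- the sorted input IS the flatten of its sorted distinct values, each count-replicated
lemma sorted_eq_flat (grupo : List String) :
    PySem.List.sorted grupo (fun x => x) false
      = (PySem.List.sorted (PySem.List.dedup grupo) (fun x => x) false).flatMap
          (fun v => List.replicate (grupo.count v) v) := by
  have hvperm : (PySem.List.sorted (PySem.List.dedup grupo) (fun x => x) false).Perm
      (PySem.List.dedup grupo) := PySem.List.sorted_perm _ _ _
  have hvnodup : (PySem.List.sorted (PySem.List.dedup grupo) (fun x => x) false).Nodup :=
    hvperm.nodup_iff.mpr (PySem.List.nodup_dedup grupo)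
  have hvmem : ∀ w, w ∈ PySem.List.sorted (PySem.List.dedup grupo) (fun x => x) false
      ↔ w ∈ grupo := by
    intro w
    rw [hvperm.mem_iff, PySem.List.mem_dedup]
  have hperm : (PySem.List.sorted grupo (fun x => x) false).Perm
      ((PySem.List.sorted (PySem.List.dedup grupo) (fun x => x) false).flatMap
        (fun v => List.replicate (grupo.count v) v)) := by
    refine (PySem.List.sorted_perm _ _ _).trans (perm_of_count_eq (fun a => ?_)).symm
    rw [count_flat _ _ hvnodup]
    by_cases ha : a ∈ grupo
    · rw [if_pos ((hvmem a).mpr ha)]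
    · rw [if_neg (fun h => ha ((hvmem a).mp h)), List.count_eq_zero.mpr ha]
  have hp1 : (PySem.List.sorted grupo (fun x => x) false).Pairwise (· ≤ ·) := by
    simpa using PySem.List.sorted_pairwise grupo (fun x => x)
  have hp2 := pairwise_flat (fun v => grupo.count v)
    (PySem.List.sorted (PySem.List.dedup grupo) (fun x => x) false)
    (by simpa using PySem.List.sorted_pairwise (PySem.List.dedup grupo) (fun x => x))
  exact PySem.List.eq_of_perm_of_pairwise_le_of_injective (fun x => x)
    (fun _ _ h => h) hperm (by simpa using hp1) (by simpa using hp2)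

-- ===== VERDICT (by name: the statement is the Claim_ definition above) =====
theorem combinacoes_spec : Claim_equal_combinacoes := by
  intro grupo _
  show combinacoes grupo = combinacoes_alt grupo
  rw [combA, combB, sorted_eq_flat grupo]
  exact (PySem.List.sorted_id_eq_sorted_id_iff_perm _ _).mpr
    (opairs_flat_perm (fun v => grupo.count v) _)
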